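-- pv_equiv track=rewrite | github.com/zhuangy47/reChord | main.py | get_barres
-- ===== SOURCE A (Python) =====
-- def get_barres(grid, starting_fret, num_strings):
--     barres = []
--
--     for fret_index, row in enumerate(grid):
--         in_sequence = False
--         starting_string = -1
--         ending_string = -1
--         for string_index, cell in enumerate(reversed(row)):
--             if (cell == 'b' and not in_sequence):
--                 starting_string = string_index + 1
--                 in_sequence = True
--             if ( ( (cell == '') or (string_index == num_strings - 1) ) and in_sequence ):
--                 ending_string = string_index
--                 barres.append((starting_fret + fret_index, starting_string, ending_string))
--
--     return barres
-- ===== SOURCE B (Python) =====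
-- def get_barres(grid, starting_fret, num_strings):
--     barres = []
--     for fret_index, row in enumerate(grid):
--         n = len(row)
--         last_b = -1
--         for k, cell in enumerate(row):
--             if cell == 'b':
--                 last_b = k
--         if last_b < 0:
--             continue
--         for k in range(last_b, -1, -1):
--             if row[k] == '' or n - 1 - k == num_strings - 1:
--                 barres.append((starting_fret + fret_index, n - last_b, n - 1 - k))
--     return barres
-- ===== Notes on version B (the rewrite author's own statement) =====
-- stated objective: alternative
-- what changed: B never builds a reversed row: it scans the original row forward to record the last 'b' index, then walks the original indices backwards (range(last_b,-1,-1)) emitting endings via the arithmetic map j = n-1-k, instead of A's sticky-flag state machine over enumerate(reversed(row)).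
import Mathlib
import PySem

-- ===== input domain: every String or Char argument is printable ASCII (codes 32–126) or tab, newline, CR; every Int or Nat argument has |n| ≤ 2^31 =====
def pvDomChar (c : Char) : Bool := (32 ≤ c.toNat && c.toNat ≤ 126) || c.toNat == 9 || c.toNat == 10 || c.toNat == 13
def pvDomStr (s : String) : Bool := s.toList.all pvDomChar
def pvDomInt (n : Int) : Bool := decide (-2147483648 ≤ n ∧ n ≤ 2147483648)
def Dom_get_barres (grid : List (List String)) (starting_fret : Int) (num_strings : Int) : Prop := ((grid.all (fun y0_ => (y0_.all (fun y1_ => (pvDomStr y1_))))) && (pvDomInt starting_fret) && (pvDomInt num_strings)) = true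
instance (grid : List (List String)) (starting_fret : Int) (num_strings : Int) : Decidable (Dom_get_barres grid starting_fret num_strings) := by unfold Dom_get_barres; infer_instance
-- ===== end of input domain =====

-- B drops A's reversed-row sticky-flag state machine: it scans the original row once to
-- record the last 'b' index, then walks indices backwards emitting endings via the
-- arithmetic map j = n-1-k, with no reversed copy (objective: alternative).


-- ===== PORT A =====
-- A's inner loop: fold over reversed row, state (in_sequence, starting_string, barres acc).
def getBarresLoopA (startingFret fret numStrings : Int) :
    List String → Int → Bool → Int → List (Int × Int × Int) → List (Int × Int × Int)
  | [], _, _, _, acc => acc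
  | cell :: rest, stringIndex, inSeq, startStr, acc =>
    let p := if cell == "b" && !inSeq then (true, stringIndex + 1) else (inSeq, startStr)
    let acc' := if (cell == "" || stringIndex == numStrings - 1) && p.1 then
        acc ++ [(startingFret + fret, p.2, stringIndex)] else acc
    getBarresLoopA startingFret fret numStrings rest (stringIndex + 1) p.1 p.2 acc'

-- A's outer loop: enumerate(grid), per row run the inner loop on reversed(row).
def getBarresRowsA (startingFret numStrings : Int) :
    List (List String) → Int → List (Int × Int × Int) → List (Int × Int × Int)
  | [], _, acc => acc
  | row :: rest, fretIndex, acc =>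
    getBarresRowsA startingFret numStrings rest (fretIndex + 1)
      (getBarresLoopA startingFret fretIndex numStrings row.reverse 0 false (-1) acc)

def get_barres (grid : List (List String)) (starting_fret : Int) (num_strings : Int) :
    List (Int × Int × Int) :=
  getBarresRowsA starting_fret num_strings grid 0 []

-- ===== PORT B =====
-- Source B's first inner loop: forward scan of the original row recording the index of the last 'b'.
def lastBScan : List String → Int → Int → Int
  | [], _, lastB => lastB
  | cell :: rest, k, lastB => lastBScan rest (k + 1) (if cell == "b" then k else lastB)

-- Source B's second inner loop, `for k in range(last_b, -1, -1)`, as structural recursion on the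
-- remaining count m (fuel m+1 means current k = m; the call starts at m = last_b ≥ 0, and every
-- k visited satisfies 0 ≤ k ≤ last_b < n, so Python's row[k] is the total List.getD m "").
def emitDown (base startS numStrings n : Int) (row : List String) : Nat → List (Int × Int × Int)
  | 0 => []
  | m + 1 =>
    (if row.getD m "" == "" || n - 1 - (m : Int) == numStrings - 1
     then [(base, startS, n - 1 - (m : Int))] else []) ++
    emitDown base startS numStrings n row m

-- Source B's outer loop: per row compute n and last_b; skip the row if last_b < 0, else emit.
def getBarresRowsB (startingFret numStrings : Int) :
    List (List String) → Int → List (Int × Int × Int)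
  | [], _ => []
  | row :: rest, fretIndex =>
    (if lastBScan row 0 (-1) < 0 then []
     else emitDown (startingFret + fretIndex) ((row.length : Int) - lastBScan row 0 (-1))
        numStrings (row.length : Int) row ((lastBScan row 0 (-1)).toNat + 1)) ++
    getBarresRowsB startingFret numStrings rest (fretIndex + 1)

def get_barres_alt (grid : List (List String)) (starting_fret : Int) (num_strings : Int) :
    List (Int × Int × Int) :=
  getBarresRowsB starting_fret num_strings grid 0

-- ===== PRECONDITION & SPEC =====
def Spec_get_barres (grid : List (List String)) (starting_fret : Int) (num_strings : Int) (out : List (Int × Int × Int)) : Prop := out = get_barres_alt grid starting_fret num_strings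
instance (grid : List (List String)) (starting_fret : Int) (num_strings : Int) (out : List (Int × Int × Int)) : Decidable (Spec_get_barres grid starting_fret num_strings out) := by unfold Spec_get_barres; infer_instance

-- ===== CLAIM (what is proved, stated in full; the proofs are below) =====
def Claim_equal_get_barres : Prop := ∀ (grid : List (List String)) (starting_fret : Int) (num_strings : Int), Dom_get_barres grid starting_fret num_strings → Spec_get_barres grid starting_fret num_strings (get_barres grid starting_fret num_strings)

-- ===== LEMMAS AND PROOFS =====

-- Proof-only midpoint form: endings collected left-to-right over a suffix of the reversed row.
def pvCollect (base startS numStrings : Int) : List String → Int → List (Int × Int × Int)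
  | [], _ => []
  | cell :: rest, j =>
    (if cell == "" || j == numStrings - 1 then [(base, startS, j)] else []) ++
      pvCollect base startS numStrings rest (j + 1)

-- Once in_sequence is set, A's loop appends exactly the collected endings.
theorem loopA_true (sf f ns : Int) (cells : List String) :
    ∀ (j s : Int) (acc : List (Int × Int × Int)),
      getBarresLoopA sf f ns cells j true s acc =
        acc ++ pvCollect (sf + f) s ns cells j := by
  induction cells with
  | nil => intro j s acc; simp [getBarresLoopA, pvCollect]
  | cons cell rest ih =>
    intro j s acc
    simp only [getBarresLoopA, pvCollect]
    rw [show (cell == "b" && !true) = false by simp]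
    rw [if_neg (by simp)]
    by_cases hc : (cell == "" || j == ns - 1) = true
    · rw [show ((cell == "" || j == ns - 1) && (true, s).1) = true by simp [hc]]
      rw [if_pos rfl, hc, if_pos rfl]
      show getBarresLoopA sf f ns rest (j + 1) true s (acc ++ [(sf + f, s, j)]) = _
      rw [ih]
      simp
    · rw [show ((cell == "" || j == ns - 1) && (true, s).1) = false by simp_all]
      rw [if_neg (by simp)]
      rw [show (cell == "" || j == ns - 1) = false by simp_all]
      rw [if_neg (by simp)]
      show getBarresLoopA sf f ns rest (j + 1) true s acc = _
      rw [ih]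
      simp

-- Before in_sequence is set, A's loop produces the find-first-'b'-then-collect form.
theorem loopA_false (sf f ns : Int) (cells : List String) :
    ∀ (j s : Int) (acc : List (Int × Int × Int)),
      getBarresLoopA sf f ns cells j false s acc =
        acc ++ (if cells.contains "b" then
            pvCollect (sf + f) (j + (cells.idxOf "b" : Int) + 1) ns
              (cells.drop (cells.idxOf "b")) (j + (cells.idxOf "b" : Int))
          else []) := by
  induction cells with
  | nil => intro j s acc; simp [getBarresLoopA]
  | cons cell rest ih =>
    intro j s acc
    by_cases hb : cell = "b"
    · subst hb
      simp only [getBarresLoopA]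
      rw [show (("b" : String) == "b" && !false) = true by simp]
      rw [if_pos rfl]
      have hcb : (("b" :: rest).contains "b") = true := by simp
      have hix : ((("b" :: rest).idxOf "b") : Nat) = 0 := by simp
      rw [hcb, if_pos rfl, hix]
      simp only [List.drop_zero, Int.natCast_zero, add_zero]
      by_cases hj : (j == ns - 1) = true
      · rw [show ((("b" : String) == "" || j == ns - 1) && (true, j + 1).1) = true by
          simp [hj]]
        rw [if_pos rfl]
        show getBarresLoopA sf f ns rest (j + 1) true (j + 1)
            (acc ++ [(sf + f, j + 1, j)]) = _
        rw [loopA_true]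
        simp only [pvCollect]
        rw [show (("b" : String) == "" || j == ns - 1) = true by simp [hj]]
        simp
      · rw [show ((("b" : String) == "" || j == ns - 1) && (true, j + 1).1) = false by
          simp [hj]]
        rw [if_neg (by simp)]
        show getBarresLoopA sf f ns rest (j + 1) true (j + 1) acc = _
        rw [loopA_true]
        simp only [pvCollect]
        rw [show (("b" : String) == "" || j == ns - 1) = false by simp [hj]]
        simp
    · have hb' : (cell == "b") = false := by simpa using hb
      have hbc : (("b" : String) == cell) = false := by
        simpa using fun h => hb h.symm
      simp only [getBarresLoopA, hb', Bool.false_and]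
      rw [if_neg (by simp), if_neg (by simp)]
      show getBarresLoopA sf f ns rest (j + 1) false s acc = _
      rw [ih]
      have hix : (cell :: rest).idxOf "b" = rest.idxOf "b" + 1 := by
        simp [List.idxOf_cons, hb']
      have hcon : ((cell :: rest).contains "b") = rest.contains "b" := by
        simp only [List.contains_cons, hbc, Bool.false_or]
      rw [hix, hcon]
      by_cases hr : rest.contains "b" = true
      · rw [if_pos hr, if_pos hr, List.drop_succ_cons]
        have : j + 1 + ((rest.idxOf "b" : Nat) : Int) =
            j + ((rest.idxOf "b" + 1 : Nat) : Int) := by push_cast; ring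
        rw [this]
      · rw [if_neg hr, if_neg hr]

-- lastBScan computes the index of the last 'b' (offset by j), i.e. n-1-idxOf in the reverse.
theorem lastBScan_spec (row : List String) :
    ∀ (j lb : Int),
      lastBScan row j lb = if row.contains "b"
        then j + (row.length : Int) - 1 - (row.reverse.idxOf "b" : Int)
        else lb := by
  induction row with
  | nil => intro j lb; simp [lastBScan]
  | cons cell rest ih =>
    intro j lb
    simp only [lastBScan]
    rw [ih]
    by_cases hr : rest.contains "b" = true
    · have hm : ("b" : String) ∈ rest := by simpa using hr
      have hmr : ("b" : String) ∈ rest.reverse := by simpa using hm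
      have hcon : ((cell :: rest).contains "b") = true := by simp [hm]
      have hrev : (cell :: rest).reverse = rest.reverse ++ [cell] := by simp
      rw [hr, if_pos rfl, hcon, if_pos rfl, hrev,
        List.idxOf_append_of_mem hmr]
      simp only [List.length_cons]
      push_cast
      ring
    · have hnm : ("b" : String) ∉ rest := by simpa using hr
      have hnmr : ("b" : String) ∉ rest.reverse := by simpa using hnm
      rw [if_neg hr]
      by_cases hb : cell = "b"
      · subst hb
        have hcon : ((("b" : String) :: rest).contains "b") = true := by simp
        have hrev : (("b" : String) :: rest).reverse = rest.reverse ++ ["b"] := by simp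
        rw [if_pos (show (("b" : String) == "b") = true by decide), hcon, if_pos rfl, hrev,
          List.idxOf_append_of_notMem hnmr]
        simp only [List.length_cons, List.length_reverse]
        have : (["b"] : List String).idxOf "b" = 0 := by simp
        rw [this]
        push_cast
        ring
      · have hb' : (cell == "b") = false := by simpa using hb
        have hbc : (("b" : String) == cell) = false := by
          simpa using fun h : ("b" : String) = cell => hb (Eq.symm h)
        have hrf : rest.contains "b" = false := by simpa using hr
        have hcon : ((cell :: rest).contains "b") = false := by
          simp only [List.contains_cons, hbc, hrf, Bool.or_false]
        rw [hb', hcon]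
        simp

-- emitDown over the first m cells equals pvCollect over the reverse of the taken prefix.
theorem emitDown_collect (base s ns : Int) (row : List String) :
    ∀ m : Nat, m ≤ row.length →
      emitDown base s ns (row.length : Int) row m =
        pvCollect base s ns ((row.take m).reverse) ((row.length : Int) - (m : Int)) := by
  intro m
  induction m with
  | zero => intro _; simp [emitDown, pvCollect]
  | succ m ih =>
    intro h
    have hm : m < row.length := by omega
    have htake : row.take (m + 1) = row.take m ++ [row.getD m ""] := by
      rw [List.take_add_one]
      simp [hm]
    simp only [emitDown, htake, List.reverse_append, List.reverse_singleton,
      List.singleton_append, pvCollect]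
    have h1 : (row.length : Int) - ((m : Int) + 1) = (row.length : Int) - 1 - (m : Int) := by
      ring
    have h2 : (row.length : Int) - (m + 1 : Nat) + 1 = (row.length : Int) - (m : Int) := by
      push_cast; ring
    rw [ih (by omega)]
    push_cast
    rw [show (row.length : Int) - ((m : Int) + 1) + 1 = (row.length : Int) - (m : Int) by ring]
    congr 1
    rw [show (row.length : Int) - ((m : Int) + 1) = (row.length : Int) - 1 - (m : Int) by ring]

-- Per-row bridge: B's backward index walk equals A's collect over the reversed-row suffix.
theorem rowB_eq_collect (base ns : Int) (row : List String) (h : row.contains "b" = true) :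
    (if lastBScan row 0 (-1) < 0 then []
     else emitDown base ((row.length : Int) - lastBScan row 0 (-1)) ns
        (row.length : Int) row ((lastBScan row 0 (-1)).toNat + 1)) =
      pvCollect base ((row.reverse.idxOf "b" : Int) + 1) ns
        (row.reverse.drop (row.reverse.idxOf "b")) ((row.reverse.idxOf "b" : Int)) := by
  have hmr : ("b" : String) ∈ row.reverse := by
    simpa using (by simpa using h : ("b" : String) ∈ row)
  have hi0 : row.reverse.idxOf "b" < row.length := by
    have := List.idxOf_lt_length_of_mem hmr
    simpa using this
  have hkb : lastBScan row 0 (-1) =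
      (row.length : Int) - 1 - (row.reverse.idxOf "b" : Int) := by
    rw [lastBScan_spec row 0 (-1), if_pos h]; ring
  have hge : ¬ lastBScan row 0 (-1) < 0 := by
    rw [hkb]; omega
  rw [if_neg hge, hkb]
  have htoNat : ((row.length : Int) - 1 - (row.reverse.idxOf "b" : Int)).toNat + 1 =
      row.length - row.reverse.idxOf "b" := by omega
  rw [htoNat]
  rw [emitDown_collect base _ ns row _ (by omega)]
  have hdrop : (row.take (row.length - row.reverse.idxOf "b")).reverse =
      row.reverse.drop (row.reverse.idxOf "b") := by
    rw [List.drop_reverse]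
  rw [hdrop]
  have h1 : (row.length : Int) - ((row.length - row.reverse.idxOf "b" : Nat) : Int) =
      (row.reverse.idxOf "b" : Int) := by omega
  have h2 : (row.length : Int) - ((row.length : Int) - 1 - (row.reverse.idxOf "b" : Int)) =
      (row.reverse.idxOf "b" : Int) + 1 := by ring
  rw [h1, h2]

-- Outer loops agree, for any accumulator and fret index.
theorem rowsA_eq (sf ns : Int) (grid : List (List String)) :
    ∀ (fi : Int) (acc : List (Int × Int × Int)),
      getBarresRowsA sf ns grid fi acc = acc ++ getBarresRowsB sf ns grid fi := by
  induction grid with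
  | nil => intro fi acc; simp [getBarresRowsA, getBarresRowsB]
  | cons row rest ih =>
    intro fi acc
    simp only [getBarresRowsA, getBarresRowsB, ih, loopA_false]
    have hcr : row.reverse.contains "b" = row.contains "b" := by
      simp
    by_cases h : row.contains "b" = true
    · rw [hcr, h, if_pos rfl]
      rw [rowB_eq_collect (sf + fi) ns row h]
      simp [List.append_assoc]
    · have hkb : lastBScan row 0 (-1) = -1 := by
        rw [lastBScan_spec row 0 (-1), if_neg h]
      rw [hcr, show row.contains "b" = false by simpa using h]
      rw [if_neg (by simp), hkb, if_pos (by norm_num)]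
      simp

-- ===== VERDICT (by name: the statement is the Claim_ definition above) =====
theorem get_barres_spec : Claim_equal_get_barres := by
  intro grid sf ns _
  unfold Spec_get_barres get_barres get_barres_alt
  simpa using rowsA_eq sf ns grid 0 []
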